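-- pv_equiv track=rewrite | github.com/krlong014/SymPDE | SymPDE/Arrangements.py | integerDigits
-- ===== SOURCE A (Python) =====
-- def integerDigits(x, N, M):
--     '''
--     Return as a tuple the first M digits of x in base N integer arithmetic.
--     It is assumed that 0 <= x <= N**M-1.
--     '''
--
--
--     assert(isinstance(M,int) and M>0)
--     assert(isinstance(N,int) and N>0)
--     assert(isinstance(x,int) and x>=0 and x<N**M)
--
--     digits = []
--     remainder = x
--     for i in range(0,M):
--         d = remainder % N
--         digits.append(d)
--         remainder = remainder // N
--
--     return tuple(digits)
-- ===== SOURCE B (Python) =====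
-- def integerDigits(x, N, M):
--     assert(isinstance(M,int) and M>0)
--     assert(isinstance(N,int) and N>0)
--     assert(isinstance(x,int) and x>=0 and x<N**M)
--     def go(x, M):
--         if x == 0:
--             return (0,) * M
--         if M == 1:
--             return (x % N,)
--         h = M // 2
--         hi, lo = divmod(x, N ** h)
--         return go(lo, h) + go(hi, M - h)
--     return go(x, M)
-- ===== Notes on version B (the rewrite author's own statement) =====
-- stated objective: alternative
-- what changed: Replaces the linear digit-by-digit division loop (threaded remainder accumulator) with a divide-and-conquer split: x is divmod-ed by N**(M//2), the two halves are converted recursively, and an all-zero block is emitted directly when a part is 0.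
import Mathlib
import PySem

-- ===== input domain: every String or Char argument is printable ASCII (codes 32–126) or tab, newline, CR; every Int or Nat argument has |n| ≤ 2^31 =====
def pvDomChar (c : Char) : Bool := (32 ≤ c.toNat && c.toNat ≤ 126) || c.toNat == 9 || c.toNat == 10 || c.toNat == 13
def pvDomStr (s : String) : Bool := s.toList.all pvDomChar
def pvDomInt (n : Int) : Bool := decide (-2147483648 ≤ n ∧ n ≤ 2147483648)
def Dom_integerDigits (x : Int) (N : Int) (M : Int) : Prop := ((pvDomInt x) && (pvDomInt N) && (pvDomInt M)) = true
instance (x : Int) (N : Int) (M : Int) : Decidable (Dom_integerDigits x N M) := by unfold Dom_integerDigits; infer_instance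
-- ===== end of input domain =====

-- B replaces A's digit-by-digit division loop with a divide-and-conquer split of x at N**(M//2), emitting zero blocks directly (objective: alternative algorithm).

-- ===== PORT A =====
def integerDigits (x : Int) (N : Int) (M : Int) : List Int :=
  -- digits = []; remainder = x; for i in range(0,M): d = remainder % N; digits.append(d); remainder = remainder // N
  let s := (PySem.List.pyRange 0 M 1).foldl
    (fun (p : List Int × Int) _ =>
      (p.1 ++ [PySem.Int.mod p.2 N], PySem.Int.floordiv p.2 N))
    (([] : List Int), x)
  s.1

-- ===== PORT B =====
-- go(x, M): if x == 0: return (0,)*M ; if M == 1: return (x % N,) ; h = M//2 ; hi, lo = divmod(x, N**h) ; return go(lo,h)+go(hi,M-h)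
-- (the 'M ≤ 1' base is a totality guard: for M ≤ 0 Python's go never terminates, which Pre_ excludes)
def integerDigitsGo (N : Int) (x : Int) (M : Int) : List Int :=
  if x = 0 then List.replicate M.toNat 0
  else if M ≤ 1 then [PySem.Int.mod x N]
  else
    let h := PySem.Int.floordiv M 2
    let hi := PySem.Int.floordiv x (N ^ h.toNat)
    let lo := PySem.Int.mod x (N ^ h.toNat)
    integerDigitsGo N lo h ++ integerDigitsGo N hi (M - h)
termination_by M.toNat
decreasing_by
  · simp only [PySem.Int.floordiv_eq_ediv_of_pos (by norm_num : (0:Int) < 2)]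
    omega
  · simp only [PySem.Int.floordiv_eq_ediv_of_pos (by norm_num : (0:Int) < 2)]
    omega

def integerDigits_alt (x : Int) (N : Int) (M : Int) : List Int :=
  integerDigitsGo N x M

-- ===== PRECONDITION & SPEC =====
-- Pre_ = exactly A's three asserts (AssertionError otherwise): M>0, N>0, 0 ≤ x < N**M.
def Pre_integerDigits (x : Int) (N : Int) (M : Int) : Prop :=
  0 < M ∧ 0 < N ∧ 0 ≤ x ∧ x < N ^ M.toNat
instance (x : Int) (N : Int) (M : Int) : Decidable (Pre_integerDigits x N M) := by
  unfold Pre_integerDigits; infer_instance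
def pvWitness_integerDigits : Int × Int × Int := (5, 2, 3)

def Spec_integerDigits (x : Int) (N : Int) (M : Int) (out : List Int) : Prop := out = integerDigits_alt x N M
instance (x : Int) (N : Int) (M : Int) (out : List Int) : Decidable (Spec_integerDigits x N M out) := by unfold Spec_integerDigits; infer_instance

-- ===== CLAIM (what is proved, stated in full; the proofs are below) =====
def Claim_equal_integerDigits : Prop := ∀ (x : Int) (N : Int) (M : Int), Dom_integerDigits x N M → Pre_integerDigits x N M → Spec_integerDigits x N M (integerDigits x N M)

-- ===== LEMMAS AND PROOFS =====

-- successive floor divisions by powers of N compose (for N > 0)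
lemma floordiv_pow_add (x N : Int) (hN : 0 < N) (a b : Nat) :
    PySem.Int.floordiv (PySem.Int.floordiv x (N ^ a)) (N ^ b) = PySem.Int.floordiv x (N ^ (a + b)) := by
  rw [PySem.Int.floordiv_eq_ediv_of_pos (pow_pos hN a),
      PySem.Int.floordiv_eq_ediv_of_pos (pow_pos hN b),
      PySem.Int.floordiv_eq_ediv_of_pos (pow_pos hN (a + b)),
      Int.ediv_ediv_of_nonneg (pow_pos hN a).le, pow_add]

lemma floordiv_pow_succ (x N : Int) (hN : 0 < N) (m : Nat) :
    PySem.Int.floordiv (PySem.Int.floordiv x (N ^ m)) N = PySem.Int.floordiv x (N ^ (m + 1)) := by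
  have := floordiv_pow_add x N hN m 1
  simpa using this

-- digit k < h of the low part x % N^h is digit k of x
lemma digit_mod_pow (x N : Int) (hN : 0 < N) (h k : Nat) (hk : k < h) :
    PySem.Int.mod (PySem.Int.floordiv (PySem.Int.mod x (N ^ h)) (N ^ k)) N
      = PySem.Int.mod (PySem.Int.floordiv x (N ^ k)) N := by
  have hk' : (0:Int) < N ^ k := pow_pos hN k
  have hh : (0:Int) < N ^ h := pow_pos hN h
  rw [PySem.Int.mod_eq_emod_of_pos hh, PySem.Int.floordiv_eq_ediv_of_pos hk',
      PySem.Int.floordiv_eq_ediv_of_pos hk', PySem.Int.mod_eq_emod_of_pos hN,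
      PySem.Int.mod_eq_emod_of_pos hN]
  -- x = x % N^h + (x / N^h) * N^h, and N^h = N^(h-k-1) * N * N^k
  have hx : x = x % N ^ h + (x / N ^ h * (N ^ (h - k - 1) * N)) * N ^ k := by
    have hpw : (x / N ^ h * (N ^ (h - k - 1) * N)) * N ^ k = x / N ^ h * N ^ h := by
      rw [mul_assoc, mul_assoc, ← pow_succ', ← pow_add]
      congr 2
      omega
    rw [hpw]
    have := Int.emod_add_mul_ediv x (N ^ h)
    linarith
  conv_rhs => rw [hx]
  rw [Int.add_mul_ediv_right _ _ (ne_of_gt hk')]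
  rw [show x / N ^ h * (N ^ (h - k - 1) * N) = (x / N ^ h * N ^ (h - k - 1)) * N from by ring,
      Int.add_mul_emod_self_right]

-- A's loop state after n iterations
lemma loopA (x N : Int) (hN : 0 < N) (n : Nat) : ∀ (j : Nat) (ds : List Int),
    (List.range n).foldl
      (fun (p : List Int × Int) _ =>
        (p.1 ++ [PySem.Int.mod p.2 N], PySem.Int.floordiv p.2 N))
      (ds, PySem.Int.floordiv x (N ^ j))
    = (ds ++ (List.range n).map (fun k => PySem.Int.mod (PySem.Int.floordiv x (N ^ (j + k))) N),
       PySem.Int.floordiv x (N ^ (j + n))) := by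
  induction n with
  | zero => simp
  | succ n ih =>
    intro j ds
    rw [List.range_succ, List.foldl_append, ih j ds]
    simp only [List.foldl_cons, List.foldl_nil, List.map_append, List.map_cons, List.map_nil,
      List.append_assoc]
    rw [floordiv_pow_succ x N hN (j + n)]
    have : j + (n + 1) = j + n + 1 := by omega
    rw [this]

-- B's recursion computes the place-value digits
lemma goB_eq (N : Int) (hN : 0 < N) : ∀ (m : Nat), 1 ≤ m → ∀ (x : Int),
    integerDigitsGo N x (m : Int)
      = (List.range m).map (fun k => PySem.Int.mod (PySem.Int.floordiv x (N ^ k)) N) := by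
  intro m
  induction m using Nat.strong_induction_on with
  | _ m ih =>
    intro hm x
    have hzero : ∀ k, PySem.Int.mod (PySem.Int.floordiv 0 (N ^ k)) N = 0 := by
      intro k
      rw [PySem.Int.floordiv_eq_ediv_of_pos (pow_pos hN k), Int.zero_ediv,
          PySem.Int.mod_eq_emod_of_pos hN, Int.zero_emod]
    by_cases hx0 : x = 0
    · subst hx0
      rw [integerDigitsGo, if_pos rfl]
      rw [List.map_congr_left (fun k _ => hzero k), List.map_const', List.length_range]
      simp
    by_cases h1 : m = 1
    · subst h1
      rw [integerDigitsGo, if_neg hx0]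
      simp [List.range_succ]
    · have hm2 : 2 ≤ m := by omega
      rw [integerDigitsGo, if_neg hx0]
      have hnotle : ¬ ((m : Int) ≤ 1) := by exact_mod_cast (by omega : ¬ (m ≤ 1))
      rw [if_neg hnotle]
      have hhalf : PySem.Int.floordiv (m : Int) 2 = ((m / 2 : Nat) : Int) := by
        rw [PySem.Int.floordiv_eq_ediv_of_pos (by norm_num : (0:Int) < 2)]
        omega
      simp only [hhalf]
      set h : Nat := m / 2 with hh
      have hh1 : 1 ≤ h := by omega
      have hhlt : h < m := by omega
      have htn : ((h : Int)).toNat = h := Int.toNat_natCast h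
      have hsub : (m : Int) - (h : Int) = ((m - h : Nat) : Int) := by omega
      rw [htn, hsub, ih h hhlt hh1, ih (m - h) (by omega) (by omega)]
      -- split range m at h
      have hsplit : m = h + (m - h) := by omega
      rw [hsplit, List.range_add, List.map_append, List.map_map]
      congr 1
      · -- low digits: k < h
        apply List.map_congr_left
        intro k hk
        have hk' : k < h := List.mem_range.mp hk
        exact digit_mod_pow x N hN h k hk'
      · -- high digits: digit k of x / N^h is digit h + k of x
        rw [show h + (m - h) - h = m - h from by omega]
        apply List.map_congr_left
        intro k _
        simp only [Function.comp]
        rw [floordiv_pow_add x N hN h k]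

-- ===== VERDICT (by name: the statement is the Claim_ definition above) =====
theorem integerDigits_spec : Claim_equal_integerDigits := by
  intro x N M _ hpre
  obtain ⟨hM, hN, hx, hxM⟩ := hpre
  unfold Spec_integerDigits integerDigits integerDigits_alt
  rw [PySem.List.pyRange_one]
  have hx0 : PySem.Int.floordiv x (N ^ (0:Nat)) = x := by
    rw [pow_zero, PySem.Int.floordiv_eq_ediv_of_pos one_pos, Int.ediv_one]
  have hA := loopA x N hN (M - 0).toNat 0 ([] : List Int)
  rw [hx0] at hA
  simp only [List.foldl_map, hA]
  have hMc : ((M.toNat : Int)) = M := Int.toNat_of_nonneg (le_of_lt hM)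
  have hB := goB_eq N hN M.toNat (by omega) x
  rw [hMc] at hB
  rw [hB]
  simp
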